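-- pv_equiv track=rewrite | github.com/dneff/adventofcode | python/2016/04/solution1.py | isRealRoom
-- ===== SOURCE A (Python) =====
-- from collections import defaultdict  # noqa: E402
--
-- def isRealRoom(name, checksum):
--     count = defaultdict(int)
--     for c in name:
--         if c == "-":
--             continue
--         count[c] += 1
--
--     frequency = defaultdict(list)
--     for k, v in count.items():
--         frequency[v].append(k)
--
--     generated_sum = []
--     for k in sorted(frequency.keys(), reverse=True):
--         generated_sum.extend(sorted(frequency[k]))
--     generated_sum = "".join([str(x) for x in generated_sum])
--     if generated_sum[:5] == checksum:
--         return True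
--     return False
-- ===== SOURCE B (Python) =====
-- def isRealRoom(name, checksum):
--     count = {}
--     for c in name:
--         if c != "-":
--             count[c] = count.get(c, 0) + 1
--     ranked = sorted(count.items(), key=lambda kv: (-kv[1], kv[0]))
--     return "".join(k for k, _ in ranked[:5]) == checksum
-- ===== Notes on version B (the rewrite author's own statement) =====
-- stated objective: simpler
-- what changed: B drops A's inverse count->letters bucket dict and its per-bucket sorts, sorting the (letter,count) items once by the composite key (-count, letter) and joining the first five letters.
import Mathlib
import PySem

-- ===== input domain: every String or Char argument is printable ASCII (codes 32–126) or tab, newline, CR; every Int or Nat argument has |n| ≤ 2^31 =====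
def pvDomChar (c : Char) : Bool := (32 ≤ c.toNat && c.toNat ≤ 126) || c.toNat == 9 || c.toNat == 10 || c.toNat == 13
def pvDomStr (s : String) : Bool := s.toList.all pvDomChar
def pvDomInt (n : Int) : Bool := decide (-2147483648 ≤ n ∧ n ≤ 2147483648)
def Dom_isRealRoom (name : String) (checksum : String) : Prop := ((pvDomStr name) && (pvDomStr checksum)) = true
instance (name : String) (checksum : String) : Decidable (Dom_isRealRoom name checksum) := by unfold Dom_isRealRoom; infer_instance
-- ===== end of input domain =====

-- B replaces A's inverse count->letters bucket dict and per-bucket sorts by ONE sort of the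
-- (letter, count) items under the composite key (-count, letter); equivalence of the return value is proved.

-- ===== PORT A =====
-- A's generated_sum is a list of single characters; ''.join([str(x) for x in it]) is modelled
-- as the list of those characters, and the string comparison generated_sum[:5] == checksum as
-- equality with checksum.toList (exact: str(c) = c for a character).
def isRealRoom (name : String) (checksum : String) : Bool :=
  let count : PySem.Dict Char Int :=
    name.toList.foldl (fun d c => if c = '-' then d else d.modify c 0 (· + 1)) PySem.Dict.empty
  let frequency : PySem.Dict Int (List Char) :=
    count.items.foldl (fun d kv => d.modify kv.2 [] (· ++ [kv.1])) PySem.Dict.empty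
  let generatedSum : List Char :=
    (PySem.List.sorted frequency.keys (fun x => x) true).foldl
      (fun acc k => acc ++ PySem.List.sorted (frequency.getD k []) (fun x => x) false) []
  if PySem.List.slice generatedSum none (some 5) = checksum.toList then true else false

-- ===== PORT B =====
def isRealRoom_alt (name : String) (checksum : String) : Bool :=
  let count : PySem.Dict Char Int :=
    name.toList.foldl (fun d c => if c ≠ '-' then d.insert c (d.getD c 0 + 1) else d)
      PySem.Dict.empty
  let ranked := PySem.List.sorted2 count.items (fun kv => -kv.2) (fun kv => kv.1) false
  decide ((PySem.List.slice ranked none (some 5)).map (·.1) = checksum.toList)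

-- ===== PRECONDITION & SPEC =====
def Spec_isRealRoom (name : String) (checksum : String) (out : Bool) : Prop := out = isRealRoom_alt name checksum
instance (name : String) (checksum : String) (out : Bool) : Decidable (Spec_isRealRoom name checksum out) := by unfold Spec_isRealRoom; infer_instance

-- ===== CLAIM (what is proved, stated in full; the proofs are below) =====
def Claim_equal_isRealRoom : Prop := ∀ (name : String) (checksum : String), Dom_isRealRoom name checksum → Spec_isRealRoom name checksum (isRealRoom name checksum)

-- ===== LEMMAS AND PROOFS =====

-- the non-dash characters of the name, the multiset both programs count
def pvL (name : String) : List Char := name.toList.filter (fun c => decide ¬(c = '-'))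
-- number of occurrences of c among them
def pvCnt (name : String) (c : Char) : Int := ((pvL name).count c : Int)
-- scalar encoding of the composite key (-count, letter): Char.toNat < 2097152
def pvKey (name : String) (c : Char) : Int := -(pvCnt name c) * 2097152 + (c.toNat : Int)

lemma pvChar_toNat_lt (c : Char) : c.toNat < 2097152 := by
  have h := c.valid
  unfold Char.toNat
  rcases h with h | h <;> omega

lemma pvChar_lt_iff (a b : Char) : a < b ↔ a.toNat < b.toNat := by
  simp [Char.lt_def, UInt32.lt_iff_toNat_lt]

lemma pvKey_inj (name : String) : Function.Injective (pvKey name) := by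
  intro a b h
  unfold pvKey at h
  have ha := pvChar_toNat_lt a
  have hb := pvChar_toNat_lt b
  have : a.toNat = b.toNat := by omega
  exact Char.ext (UInt32.toNat_inj.mp this)

-- both counting loops build Counter(pvL name)
lemma pvCountA_eq (name : String) :
    name.toList.foldl (fun d c => if c = '-' then d else d.modify c 0 (· + 1)) PySem.Dict.empty
      = PySem.Dict.counter (pvL name) := by
  have hfun : (fun (d : PySem.Dict Char Int) c => if c = '-' then d else d.modify c 0 (· + 1))
      = (fun d c => if ¬(c = '-') then d.modify c 0 (· + 1) else d) := by
    funext d c; rw [ite_not]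
  rw [hfun, PySem.List.foldl_ite_eq_foldl_filter, ← PySem.Dict.counter_eq_foldl, pvL]

lemma pvCountB_eq (name : String) :
    name.toList.foldl (fun d c => if c ≠ '-' then d.insert c (d.getD c 0 + 1) else d) PySem.Dict.empty
      = PySem.Dict.counter (pvL name) := by
  rw [PySem.List.foldl_ite_eq_foldl_filter (p := fun c => c ≠ '-'),
    PySem.Dict.foldl_insert_getD_add_one_eq_counter, pvL]

-- sorted2 with the tuple key (-count, letter) is sorted with the scalar key
lemma pvSorted2_eq (xs : List (Char × Int)) :
    PySem.List.sorted2 xs (fun kv => -kv.2) (fun kv => kv.1) false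
      = PySem.List.sorted xs (fun kv => -kv.2 * 2097152 + (kv.1.toNat : Int)) false := by
  have key : (fun (a b : Char × Int) =>
        (decide (-a.2 < -b.2) || (!decide (-b.2 < -a.2) && decide (a.1 < b.1))))
      = (fun (a b : Char × Int) =>
        decide (-a.2 * 2097152 + (a.1.toNat : Int) < -b.2 * 2097152 + (b.1.toNat : Int))) := by
    funext a b
    have hta := pvChar_toNat_lt a.1
    have htb := pvChar_toNat_lt b.1
    have hc : a.1 < b.1 ↔ a.1.toNat < b.1.toNat := by
      simp [Char.lt_def, UInt32.lt_iff_toNat_lt]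
    by_cases h1 : -a.2 < -b.2
    · simp [h1]
      omega
    · by_cases h2 : -b.2 < -a.2
      · simp [h1, h2]
        omega
      · have h12 : a.2 = b.2 := by omega
        simp only [h1, h2, decide_false, Bool.not_false, Bool.false_or, Bool.true_and]
        apply decide_eq_decide.mpr
        rw [hc, h12]
        omega
  show xs.foldl (fun acc x => PySem.List.insertBy
      (fun a b => (decide (-a.2 < -b.2) || (!decide (-b.2 < -a.2) && decide (a.1 < b.1)))) x acc) []
    = xs.foldl (fun acc x => PySem.List.insertBy
      (fun a b => decide (-a.2 * 2097152 + (a.1.toNat : Int) < -b.2 * 2097152 + (b.1.toNat : Int))) x acc) []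
  rw [key]

-- sum over a Nodup list of 0/1 indicators
lemma pvSum_ite (W : List Int) (hN : W.Nodup) (t : Int) :
    (W.map (fun v => if v = t then (1 : Nat) else 0)).sum = if t ∈ W then 1 else 0 := by
  induction W with
  | nil => simp
  | cons w ws ih =>
    simp only [List.nodup_cons] at hN
    rcases hN with ⟨hw, hws⟩
    by_cases h : w = t
    · subst h
      simp [ih hws, hw]
    · simp [h, ih hws, Ne.symm h]

-- the crux: A's concatenation of per-count buckets is B's single sort, letter-wise
lemma pvLists_eq (name : String) :
    ((PySem.List.sorted (PySem.Dict.counter (pvL name)).items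
        (fun kv => -kv.2 * 2097152 + (kv.1.toNat : Int)) false).map (·.1))
      = (PySem.List.sorted
          ((PySem.Dict.counter (pvL name)).items.foldl
              (fun d kv => d.modify kv.2 [] (· ++ [kv.1])) PySem.Dict.empty).keys
            (fun x => x) true).foldl
          (fun acc k => acc ++ PySem.List.sorted
            (((PySem.Dict.counter (pvL name)).items.foldl
                (fun d kv => d.modify kv.2 [] (· ++ [kv.1])) PySem.Dict.empty).getD k [])
            (fun x => x) false) [] := by
  have hitems : (PySem.Dict.counter (pvL name)).items
      = (PySem.Set.ofList (pvL name)).map (fun k => (k, pvCnt name k)) :=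
    PySem.Dict.items_counter (pvL name)
  rw [hitems]
  set S : List Char := PySem.Set.ofList (pvL name) with hS
  set cnt : Char → Int := pvCnt name with hcnt
  set items : List (Char × Int) := S.map (fun k => (k, cnt k)) with hitems'
  -- A's frequency dict
  set freq : PySem.Dict Int (List Char) :=
    items.foldl (fun d kv => d.modify kv.2 [] (· ++ [kv.1])) PySem.Dict.empty with hfreq
  have hkeys : freq.keys = PySem.Set.ofList (S.map cnt) := by
    rw [hfreq, PySem.Dict.keys_foldl_modify_key items (fun kv => kv.2) []
      (fun _ kv => (· ++ [kv.1])) PySem.Dict.empty]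
    simp [PySem.Set.ofList_eq_foldl, PySem.Set.update, hitems', List.map_map, Function.comp_def]
  have hgetD : ∀ v : Int, freq.getD v [] = S.filter (fun k => cnt k == v) := by
    intro v
    have hswap : freq = (items.map Prod.swap).foldl
        (fun d p => d.modify p.1 [] (· ++ [p.2])) PySem.Dict.empty := by
      rw [hfreq]
      exact (List.foldl_map (f := Prod.swap)
        (g := fun (d : PySem.Dict Int (List Char)) p => d.modify p.1 [] (· ++ [p.2]))).symm
    rw [hswap, PySem.Dict.getD_foldl_modify_append, PySem.Dict.getD_empty]
    simp [hitems', List.map_map, Function.comp_def, List.filter_map]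
  have hfun : (fun (acc : List Char) k => acc ++ PySem.List.sorted (freq.getD k []) (fun x => x) false)
      = (fun acc k => acc ++ PySem.List.sorted (S.filter (fun c => cnt c == k)) (fun x => x) false) := by
    funext acc k; rw [hgetD]
  rw [hkeys, hfun, PySem.List.foldl_append_eq_flatMap, List.nil_append]
  set W : List Int := PySem.List.sorted (PySem.Set.ofList (S.map cnt)) (fun x => x) true with hW
  set bucket : Int → List Char :=
    fun v => PySem.List.sorted (S.filter (fun c => cnt c == v)) (fun x => x) false with hbucket
  -- basic facts
  have hSnodup : S.Nodup := PySem.Set.nodup_ofList _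
  have hWnodup : W.Nodup :=
    (PySem.List.sorted_perm _ _ _).nodup_iff.mpr (PySem.Set.nodup_ofList _)
  have hWgt : W.Pairwise (fun a b => b < a) := by
    have h1 := PySem.List.sorted_pairwise_rev (PySem.Set.ofList (S.map cnt)) (fun x => x)
    exact (h1.and hWnodup).imp (fun h => lt_of_le_of_ne h.1 (Ne.symm h.2))
  have hbmem : ∀ v x, x ∈ bucket v ↔ (x ∈ S ∧ cnt x = v) := by
    intro v x
    simp [hbucket, PySem.List.mem_sorted, List.mem_filter]
  have hbnodup : ∀ v, (bucket v).Nodup :=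
    fun v => (PySem.List.sorted_perm _ _ _).nodup_iff.mpr (hSnodup.filter _)
  have hble : ∀ v, (bucket v).Pairwise (fun a b => pvKey name a ≤ pvKey name b) := by
    intro v
    have h1 : (bucket v).Pairwise (fun a b => a ≤ b) := PySem.List.sorted_pairwise _ _
    refine ((h1.and (hbnodup v)).imp_of_mem ?_)
    intro a b ha hb hab
    have hca : cnt a = v := ((hbmem v a).mp ha).2
    have hcb : cnt b = v := ((hbmem v b).mp hb).2
    have hlt : a.toNat < b.toNat := (pvChar_lt_iff a b).mp (lt_of_le_of_ne hab.1 hab.2)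
    unfold pvKey
    rw [← hcnt, hca, hcb]
    omega
  have hacross : (W.map bucket).Pairwise
      (fun l1 l2 => ∀ x ∈ l1, ∀ y ∈ l2, pvKey name x ≤ pvKey name y) := by
    refine List.pairwise_map.mpr (hWgt.imp ?_)
    intro v1 v2 h12 x hx y hy
    have hcx : cnt x = v1 := ((hbmem v1 x).mp hx).2
    have hcy : cnt y = v2 := ((hbmem v2 y).mp hy).2
    have htx := pvChar_toNat_lt x
    have hty := pvChar_toNat_lt y
    unfold pvKey
    rw [← hcnt, hcx, hcy]
    omega
  have pairwiseA : (W.flatMap bucket).Pairwise (fun a b => pvKey name a ≤ pvKey name b) := by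
    rw [List.flatMap_def]
    refine List.pairwise_flatten.mpr ⟨?_, hacross⟩
    intro l hl
    rcases List.mem_map.mp hl with ⟨v, _, rfl⟩
    exact hble v
  have permA : (W.flatMap bucket).Perm S := by
    refine List.perm_iff_count.mpr (fun x => ?_)
    rw [List.count_flatMap]
    have hcount : ∀ v, (List.count x ∘ bucket) v
        = if x ∈ S then (if v = cnt x then 1 else 0) else 0 := by
      intro v
      have h1 : List.count x (bucket v) = List.count x (S.filter (fun c => cnt c == v)) :=
        (PySem.List.sorted_perm _ _ _).count_eq x
      by_cases hx : x ∈ S ∧ cnt x = v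
      · rw [Function.comp_apply, h1,
          List.count_eq_one_of_mem (hSnodup.filter _)
            (List.mem_filter.mpr ⟨hx.1, by simp [hx.2]⟩)]
        simp [hx.1, hx.2]
      · rw [Function.comp_apply, h1, List.count_eq_zero_of_not_mem
          (fun hmem => hx ⟨(List.mem_filter.mp hmem).1, by
            have := (List.mem_filter.mp hmem).2; simpa using this⟩)]
        by_cases h2 : x ∈ S
        · have : ¬ v = cnt x := fun h => hx ⟨h2, h.symm⟩
          simp [h2, this]
        · simp [h2]
    rw [List.map_congr_left (fun v _ => hcount v)]
    by_cases hx : x ∈ S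
    · have hmemW : cnt x ∈ W := by
        rw [hW, PySem.List.mem_sorted, PySem.Set.mem_ofList]
        exact List.mem_map.mpr ⟨x, hx, rfl⟩
      simp only [hx, if_true]
      rw [pvSum_ite W hWnodup (cnt x)]
      simp [hmemW, List.count_eq_one_of_mem hSnodup hx]
    · simp [hx, List.count_eq_zero_of_not_mem hx]
  -- B side
  have hBperm : ((PySem.List.sorted items
        (fun kv => -kv.2 * 2097152 + (kv.1.toNat : Int)) false).map (·.1)).Perm S := by
    have h1 := (PySem.List.sorted_perm items
      (fun kv => -kv.2 * 2097152 + (kv.1.toNat : Int)) false).map (·.1)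
    have h2 : items.map (·.1) = S := by
      simp [hitems', List.map_map, Function.comp_def]
    rwa [h2] at h1
  have hBpair : ((PySem.List.sorted items
        (fun kv => -kv.2 * 2097152 + (kv.1.toNat : Int)) false).map (·.1)).Pairwise
      (fun a b => pvKey name a ≤ pvKey name b) := by
    refine List.pairwise_map.mpr ?_
    have h1 := PySem.List.sorted_pairwise items
      (fun kv => -kv.2 * 2097152 + (kv.1.toNat : Int))
    refine h1.imp_of_mem ?_
    intro a b ha hb hab
    have ha' : a.2 = cnt a.1 := by
      rcases List.mem_map.mp ((PySem.List.mem_sorted _ _ _ _).mp ha) with ⟨k, _, rfl⟩; rfl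
    have hb' : b.2 = cnt b.1 := by
      rcases List.mem_map.mp ((PySem.List.mem_sorted _ _ _ _).mp hb) with ⟨k, _, rfl⟩; rfl
    unfold pvKey
    rw [← hcnt, ← ha', ← hb']
    exact hab
  exact PySem.List.eq_of_perm_of_pairwise_le_of_injective (pvKey name) (pvKey_inj name)
    (hBperm.trans permA.symm) hBpair pairwiseA

-- ===== VERDICT (by name: the statement is the Claim_ definition above) =====
theorem isRealRoom_spec : Claim_equal_isRealRoom := by
  intro name checksum _
  unfold Spec_isRealRoom isRealRoom isRealRoom_alt
  dsimp only
  rw [pvCountA_eq, pvCountB_eq, pvSorted2_eq]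
  rw [← pvLists_eq]
  rw [PySem.List.slice_to _ (by norm_num), PySem.List.slice_to _ (by norm_num)]
  rw [List.map_take]
  split_ifs with h
  · exact (decide_eq_true h).symm
  · exact (decide_eq_false h).symm
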